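-- pv_equiv track=rewrite | github.com/phorkyas-tg/advent-of-code | aoc2022/day17.py | initShape
-- ===== SOURCE A (Python) =====
-- def initShape(shapeIndex, board):
--     y = 0 if not board else max([pos[1] + 1 for pos in board.keys()])
--     shape = dict()
--     if shapeIndex == 0:
--         for x in range(4):
--             shape[(x + 2, y + 3)] = "@"
--     elif shapeIndex == 1:
--         shape[(3, y + 3)] = "@"
--         shape[(2, y + 4)] = "@"
--         shape[(3, y + 4)] = "@"
--         shape[(4, y + 4)] = "@"
--         shape[(3, y + 5)] = "@"
--     elif shapeIndex == 2:
--         shape[(2, y + 3)] = "@"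
--         shape[(3, y + 3)] = "@"
--         shape[(4, y + 3)] = "@"
--         shape[(4, y + 4)] = "@"
--         shape[(4, y + 5)] = "@"
--     elif shapeIndex == 3:
--         shape[(2, y + 3)] = "@"
--         shape[(2, y + 4)] = "@"
--         shape[(2, y + 5)] = "@"
--         shape[(2, y + 6)] = "@"
--     elif shapeIndex == 4:
--         shape[(2, y + 3)] = "@"
--         shape[(2, y + 4)] = "@"
--         shape[(3, y + 3)] = "@"
--         shape[(3, y + 4)] = "@"
--     else:
--         raise NotImplementedError()
--
--     return shape
-- ===== SOURCE B (Python) =====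
-- # Each shape is a list of line segments: (start_x, start_dy, step_x, step_dy, length).
-- _SEGMENTS = [
--     [(2, 3, 1, 0, 4)],                                   # horizontal bar
--     [(3, 3, 0, 0, 1), (2, 4, 1, 0, 3), (3, 5, 0, 0, 1)], # plus
--     [(2, 3, 1, 0, 3), (4, 4, 0, 1, 2)],                  # corner
--     [(2, 3, 0, 1, 4)],                                   # vertical bar
--     [(2, 3, 0, 1, 2), (3, 3, 0, 1, 2)],                  # square (two columns)
-- ]
--
--
-- def initShape(shapeIndex, board):
--     if not (0 <= shapeIndex < len(_SEGMENTS)):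
--         raise NotImplementedError()
--     top = None
--     for pos in board.keys():
--         if top is None or pos[1] > top:
--             top = pos[1]
--     y = 0 if top is None else top + 1
--     shape = {}
--     for sx, sy, dx, dy, n in _SEGMENTS[shapeIndex]:
--         for k in range(n):
--             shape[(sx + k * dx, y + sy + k * dy)] = "@"
--     return shape
-- ===== Notes on version B (the rewrite author's own statement) =====
-- stated objective: alternative
-- what changed: Each shape is described as line segments (start, direction, length) expanded arithmetically by a nested loop, and the board's top row is found by a single running-max accumulator loop instead of max() over a built list, replacing A's 5-way branch chain of hard-coded per-cell dict insertions.
import Mathlib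
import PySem

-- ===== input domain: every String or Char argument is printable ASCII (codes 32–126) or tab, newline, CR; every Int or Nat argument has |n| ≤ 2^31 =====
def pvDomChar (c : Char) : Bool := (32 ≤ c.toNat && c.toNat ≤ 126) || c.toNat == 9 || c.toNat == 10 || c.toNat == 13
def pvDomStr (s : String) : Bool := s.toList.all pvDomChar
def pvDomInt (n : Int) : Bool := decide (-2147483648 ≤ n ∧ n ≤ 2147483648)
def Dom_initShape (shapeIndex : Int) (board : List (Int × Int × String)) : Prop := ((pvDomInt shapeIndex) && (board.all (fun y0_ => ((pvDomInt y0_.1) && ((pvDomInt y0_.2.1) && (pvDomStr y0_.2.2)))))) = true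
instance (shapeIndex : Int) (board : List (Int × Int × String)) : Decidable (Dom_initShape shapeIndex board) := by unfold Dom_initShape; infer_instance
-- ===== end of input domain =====

-- B describes each shape as line segments (start, direction, length) expanded by a loop,
-- and finds the board top by a running-max accumulator, instead of A's branch chain of
-- hard-coded per-cell insertions (objective: alternative).

-- ===== PORT A =====
-- dict assignment shape[(x,y)] = v on an association list keyed by the (x,y) pair
def pyDictPut (d : List (Int × Int × String)) (k : Int × Int) (v : String) : List (Int × Int × String) :=
  if d.any (fun e => decide (e.1 = k.1 ∧ e.2.1 = k.2)) then
    d.map (fun e => if e.1 = k.1 ∧ e.2.1 = k.2 then (e.1, e.2.1, v) else e)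
  else d ++ [(k.1, k.2, v)]

def initShape (shapeIndex : Int) (board : List (Int × Int × String)) : List (Int × Int × String) :=
  -- max([...]) is only taken on a nonempty board, so getD 0 is never used
  let y : Int := if board = [] then 0 else (PySem.List.max? (board.map (fun pos => pos.2.1 + 1)) (fun v => v)).getD 0
  if shapeIndex = 0 then
    (PySem.List.pyRange 0 4 1).foldl (fun sh x => pyDictPut sh (x + 2, y + 3) "@") []
  else if shapeIndex = 1 then
    pyDictPut (pyDictPut (pyDictPut (pyDictPut (pyDictPut [] (3, y + 3) "@") (2, y + 4) "@") (3, y + 4) "@") (4, y + 4) "@") (3, y + 5) "@"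
  else if shapeIndex = 2 then
    pyDictPut (pyDictPut (pyDictPut (pyDictPut (pyDictPut [] (2, y + 3) "@") (3, y + 3) "@") (4, y + 3) "@") (4, y + 4) "@") (4, y + 5) "@"
  else if shapeIndex = 3 then
    pyDictPut (pyDictPut (pyDictPut (pyDictPut [] (2, y + 3) "@") (2, y + 4) "@") (2, y + 5) "@") (2, y + 6) "@"
  else if shapeIndex = 4 then
    pyDictPut (pyDictPut (pyDictPut (pyDictPut [] (2, y + 3) "@") (2, y + 4) "@") (3, y + 3) "@") (3, y + 4) "@"
  else
    []  -- raise NotImplementedError(): excluded by Pre_initShape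

-- ===== PORT B =====
-- segments: (start_x, start_dy, step_x, step_dy, length)
def segTable : List (List (Int × Int × Int × Int × Int)) :=
  [[(2, 3, 1, 0, 4)],
   [(3, 3, 0, 0, 1), (2, 4, 1, 0, 3), (3, 5, 0, 0, 1)],
   [(2, 3, 1, 0, 3), (4, 4, 0, 1, 2)],
   [(2, 3, 0, 1, 4)],
   [(2, 3, 0, 1, 2), (3, 3, 0, 1, 2)]]

def initShape_alt (shapeIndex : Int) (board : List (Int × Int × String)) : List (Int × Int × String) :=
  if 0 ≤ shapeIndex ∧ shapeIndex < 5 then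
    let top : Option Int := board.foldl (fun t pos =>
      match t with
      | none => some pos.2.1
      | some m => if pos.2.1 > m then some pos.2.1 else some m) none
    let y : Int := match top with | none => 0 | some m => m + 1
    let segs := (PySem.List.pyGet? segTable shapeIndex).getD []
    segs.foldl (fun sh seg =>
      (PySem.List.pyRange 0 seg.2.2.2.2 1).foldl (fun sh2 k =>
        pyDictPut sh2 (seg.1 + k * seg.2.2.1, y + seg.2.1 + k * seg.2.2.2.1) "@") sh) []
  else []  -- raise NotImplementedError(): excluded by Pre_initShape

-- ===== PRECONDITION & SPEC =====
-- A raises NotImplementedError for any shapeIndex outside 0..4 (and so does B): those inputs are excluded.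
def Pre_initShape (shapeIndex : Int) (board : List (Int × Int × String)) : Prop :=
  0 ≤ shapeIndex ∧ shapeIndex < 5
instance (shapeIndex : Int) (board : List (Int × Int × String)) : Decidable (Pre_initShape shapeIndex board) := by unfold Pre_initShape; infer_instance
def pvWitness_initShape : Int × (List (Int × Int × String)) := (1, [(0, 0, "#"), (1, 5, "#")])

def Spec_initShape (shapeIndex : Int) (board : List (Int × Int × String)) (out : List (Int × Int × String)) : Prop := out = initShape_alt shapeIndex board
instance (shapeIndex : Int) (board : List (Int × Int × String)) (out : List (Int × Int × String)) : Decidable (Spec_initShape shapeIndex board out) := by unfold Spec_initShape; infer_instance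

-- ===== CLAIM (what is proved, stated in full; the proofs are below) =====
def Claim_equal_initShape : Prop := ∀ (shapeIndex : Int) (board : List (Int × Int × String)), Dom_initShape shapeIndex board → Pre_initShape shapeIndex board → Spec_initShape shapeIndex board (initShape shapeIndex board)

-- ===== LEMMAS AND PROOFS =====

-- B's running-max accumulator over the board equals A's max over the (+1)-shifted list.
lemma foldl_top_eq (t : List (Int × Int × String)) (a : Int) :
    t.foldl (fun (m : Option Int) pos =>
      match m with
      | none => some pos.2.1
      | some m => if pos.2.1 > m then some pos.2.1 else some m) (some a)
    = some (t.foldl (fun (m : Int) pos => max m pos.2.1) a) := by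
  induction t generalizing a with
  | nil => rfl
  | cons p t ih =>
      simp only [List.foldl]
      by_cases h : p.2.1 > a
      · rw [if_pos h, ih, max_eq_right (le_of_lt h)]
      · rw [if_neg h, ih, max_eq_left (by omega : p.2.1 ≤ a)]

lemma foldl_max_add_one (t : List (Int × Int × String)) (a : Int) :
    (t.map (fun pos => pos.2.1 + 1)).foldl max (a + 1)
    = t.foldl (fun (m : Int) pos => max m pos.2.1) a + 1 := by
  induction t generalizing a with
  | nil => rfl
  | cons p t ih =>
      simp only [List.map, List.foldl]
      rw [show max (a + 1) (p.2.1 + 1) = max a p.2.1 + 1 by omega]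
      exact ih _

lemma y_eq (board : List (Int × Int × String)) :
    (match board.foldl (fun (t : Option Int) pos =>
        match t with
        | none => some pos.2.1
        | some m => if pos.2.1 > m then some pos.2.1 else some m) none with
      | none => (0 : Int)
      | some m => m + 1)
    = (if board = [] then 0 else (PySem.List.max? (board.map (fun pos => pos.2.1 + 1)) (fun v => v)).getD 0) := by
  cases board with
  | nil => rfl
  | cons p t =>
      simp only [List.foldl, List.map, PySem.List.max?_id_cons,
        reduceCtorEq, if_false, Option.getD_some, foldl_top_eq, foldl_max_add_one]

-- ===== VERDICT (by name: the statement is the Claim_ definition above) =====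
theorem initShape_spec : Claim_equal_initShape := by
  intro shapeIndex board _ hpre
  obtain ⟨h0, h5⟩ := hpre
  unfold Spec_initShape initShape initShape_alt
  simp only [y_eq]
  generalize (if board = [] then (0:Int) else (PySem.List.max? (board.map (fun pos => pos.2.1 + 1)) (fun v => v)).getD 0) = y
  interval_cases shapeIndex <;>
    simp [pyDictPut, segTable, PySem.List.pyRange, PySem.List.pyGet?, PySem.List.pyIdx?,
      List.range_succ, List.foldl]
  · rw [if_neg (by omega : ¬ (y + 3 = y + 4 + 1))]
    simp
    omega
  · omega
  · omega
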